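-- pv_equiv track=rewrite | github.com/pyrometheous/DnD-5e-Character-Generator | scripts/spellbook.py | _lookup_capabilities
-- ===== SOURCE A (Python) =====
-- def _normalize_name(value: str) -> str:
--     return value.strip().lower().replace("_", " ").replace("-", " ")
--
-- def _lookup_capabilities(name: str, mapping: dict[str, list[str]]) -> set[str]:
--     normalized = _normalize_name(name)
--     capabilities: set[str] = set()
--     for key, values in mapping.items():
--         normalized_key = _normalize_name(key)
--         if normalized == normalized_key or normalized.startswith(f"{normalized_key} ("):
--             capabilities.update(values)
--     return capabilities
-- ===== SOURCE B (Python) =====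
-- def _normalize_name(value: str) -> str:
--     return value.strip().lower().replace("_", " ").replace("-", " ")
--
-- def _lookup_capabilities(name: str, mapping: dict[str, list[str]]) -> set[str]:
--     normalized = _normalize_name(name)
--     candidates = {normalized}
--     for i in range(len(normalized) - 1):
--         if normalized[i:i + 2] == " (":
--             candidates.add(normalized[:i])
--     merged = [v for key, values in mapping.items()
--               if _normalize_name(key) in candidates
--               for v in values]
--     return set(merged)
-- ===== Notes on version B (the rewrite author's own statement) =====
-- stated objective: alternative
-- what changed: B precomputes once the set of candidate normalized keys (the normalized name itself plus its prefix before every ' (' occurrence), then does a single pass over the mapping testing set membership instead of per-key ==/startswith string comparisons, collecting matched values into a list deduplicated once at the end.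
import Mathlib
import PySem

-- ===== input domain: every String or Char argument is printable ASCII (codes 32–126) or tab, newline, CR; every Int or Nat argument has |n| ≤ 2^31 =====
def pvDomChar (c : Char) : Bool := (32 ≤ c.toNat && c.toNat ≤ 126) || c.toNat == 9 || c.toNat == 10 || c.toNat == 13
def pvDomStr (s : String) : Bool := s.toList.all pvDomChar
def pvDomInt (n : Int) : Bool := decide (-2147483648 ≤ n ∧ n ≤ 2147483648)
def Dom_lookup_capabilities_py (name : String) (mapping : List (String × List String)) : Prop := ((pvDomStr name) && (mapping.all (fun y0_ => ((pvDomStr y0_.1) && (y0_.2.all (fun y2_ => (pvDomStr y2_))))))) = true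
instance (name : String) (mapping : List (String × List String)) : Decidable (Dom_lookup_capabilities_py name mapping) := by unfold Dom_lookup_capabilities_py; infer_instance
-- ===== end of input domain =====

-- B replaces A's per-key ==/startswith tests by one precomputed candidate-key set and a
-- membership test per key (objective: alternative decomposition; same result, proved equal).

-- ===== PORT A =====
-- shared helper: _normalize_name (used by both Pythons verbatim)
def pvNormalize (value : String) : String :=
  PySem.Str.replace (PySem.Str.replace (PySem.Str.lower (PySem.Str.strip value)) "_" " ") "-" " "

def lookup_capabilities_py (name : String) (mapping : List (String × List String)) : List String :=
  let normalized := pvNormalize name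
  mapping.foldl
    (fun capabilities kv =>
      let normalized_key := pvNormalize kv.1
      if normalized == normalized_key || PySem.Str.startswith normalized (normalized_key ++ " (") then
        PySem.Set.update capabilities kv.2
      else capabilities)
    (PySem.Set.empty : PySem.Set String)

-- ===== PORT B =====
def lookup_capabilities_py_alt (name : String) (mapping : List (String × List String)) : List String :=
  let normalized := pvNormalize name
  let candidates :=
    (PySem.List.pyRange 0 (PySem.Str.len normalized - 1) 1).foldl
      (fun c i =>
        if PySem.Str.slice normalized (some i) (some (i + 2)) == " (" then
          PySem.Set.add c (PySem.Str.slice normalized none (some i))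
        else c)
      (PySem.Set.ofList [normalized])
  let merged :=
    (mapping.filter (fun kv => PySem.Set.contains candidates (pvNormalize kv.1))).flatMap
      (fun kv => kv.2)
  PySem.Set.ofList merged

-- ===== PRECONDITION & SPEC =====
def Spec_lookup_capabilities_py (name : String) (mapping : List (String × List String)) (out : List String) : Prop := out = lookup_capabilities_py_alt name mapping
instance (name : String) (mapping : List (String × List String)) (out : List String) : Decidable (Spec_lookup_capabilities_py name mapping out) := by unfold Spec_lookup_capabilities_py; infer_instance

-- ===== CLAIM (what is proved, stated in full; the proofs are below) =====
def Claim_equal_lookup_capabilities_py : Prop := ∀ (name : String) (mapping : List (String × List String)), Dom_lookup_capabilities_py name mapping → Spec_lookup_capabilities_py name mapping (lookup_capabilities_py name mapping)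

-- ===== LEMMAS AND PROOFS =====

-- A's loop: conditional set-update over the list = one update with the filtered, flattened values
theorem pv_foldl_update (p : String × List String → Bool) :
    ∀ (l : List (String × List String)) (s : PySem.Set String),
      l.foldl (fun caps kv => if p kv then PySem.Set.update caps kv.2 else caps) s
        = PySem.Set.update s ((l.filter p).flatMap (fun kv => kv.2)) := by
  intro l
  induction l with
  | nil => intro s; rfl
  | cons hd tl ih =>
    intro s
    simp only [List.foldl_cons, List.filter_cons]
    by_cases h : p hd = true
    · simp only [h, if_true, ih, List.flatMap_cons, PySem.Set.update_append]
    · simp [h, ih]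

-- membership in B's candidate-building fold
theorem pv_mem_cand_fold (cond : Int → Bool) (val : Int → String) :
    ∀ (l : List Int) (init : PySem.Set String) (x : String),
      x ∈ l.foldl (fun c i => if cond i then PySem.Set.add c (val i) else c) init
        ↔ x ∈ init ∨ ∃ i ∈ l, cond i = true ∧ x = val i := by
  intro l
  induction l with
  | nil => simp
  | cons hd tl ih =>
    intro init x
    simp only [List.foldl_cons, List.mem_cons]
    by_cases h : cond hd = true
    · rw [if_pos h, ih]
      simp only [PySem.Set.mem_add]
      constructor
      · rintro (⟨hi | hx⟩ | ⟨i, hi, hc, hx⟩)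
        · exact Or.inl hi
        · exact Or.inr ⟨hd, Or.inl rfl, h, hx⟩
        · exact Or.inr ⟨i, Or.inr hi, hc, hx⟩
      · rintro (hi | ⟨i, (rfl | hi), hc, hx⟩)
        · exact Or.inl (Or.inl hi)
        · exact Or.inl (Or.inr hx)
        · exact Or.inr ⟨i, hi, hc, hx⟩
    · rw [if_neg h, ih]
      constructor
      · rintro (hi | ⟨i, hi, hc, hx⟩)
        · exact Or.inl hi
        · exact Or.inr ⟨i, Or.inr hi, hc, hx⟩
      · rintro (hi | ⟨i, (rfl | hi), hc, hx⟩)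
        · exact Or.inl hi
        · exact absurd hc h
        · exact Or.inr ⟨i, hi, hc, hx⟩

-- the crux: A's per-key test equals membership of the normalized key in B's candidate set
theorem pv_pred_eq (N K : String) :
    (N == K || PySem.Str.startswith N (K ++ " ("))
      = PySem.Set.contains
          ((PySem.List.pyRange 0 (PySem.Str.len N - 1) 1).foldl
            (fun c i =>
              if PySem.Str.slice N (some i) (some (i + 2)) == " (" then
                PySem.Set.add c (PySem.Str.slice N none (some i))
              else c)
            (PySem.Set.ofList [N])) K := by
  apply Bool.eq_iff_iff.mpr
  rw [PySem.Set.contains_iff,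
    pv_mem_cand_fold (fun i => PySem.Str.slice N (some i) (some (i + 2)) == " (")
      (fun i => PySem.Str.slice N none (some i))]
  simp only [PySem.Set.mem_ofList, List.mem_singleton, Bool.or_eq_true, beq_iff_eq]
  have hsp : (" (" : String).toList = [' ', '('] := rfl
  have hmain : PySem.Str.startswith N (K ++ " (") = true ↔
      ∃ i ∈ PySem.List.pyRange 0 (PySem.Str.len N - 1) 1,
        (PySem.Str.slice N (some i) (some (i + 2)) == " (") = true ∧
          K = PySem.Str.slice N none (some i) := by
    rw [PySem.Str.startswith_eq, String.toList_append, hsp, PySem.Chars.startswith_iff]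
    constructor
    · rintro ⟨t, ht⟩
      rw [List.append_assoc] at ht
      refine ⟨(K.toList.length : Int), ?_, ?_, ?_⟩
      · rw [PySem.List.mem_pyRange_one]
        have hlen : N.toList.length = K.toList.length + ([' ', '('] ++ t).length := by
          rw [← ht, List.length_append]
        simp only [List.length_append, List.length_cons, List.length_nil] at hlen
        have : PySem.Str.len N = (N.toList.length : Int) := by simp
        rw [this]
        omega
      · rw [beq_iff_eq]
        apply String.ext_iff.mpr
        rw [PySem.Str.toList_slice, PySem.Chars.slice_eq_listSlice, hsp]
        have h2 : ((K.toList.length : Int) + 2) = ((K.toList.length : Int) + ((2 : Nat) : Int)) := by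
          norm_num
        rw [h2, PySem.List.slice_natCast_add, ← ht, List.drop_left]
        rfl
      · apply String.ext_iff.mpr
        rw [PySem.Str.toList_slice, PySem.Chars.slice_eq_listSlice,
          PySem.List.slice_to_natCast, ← ht, List.take_left]
    · rintro ⟨i, hi, hc, hK⟩
      rw [PySem.List.mem_pyRange_one] at hi
      obtain ⟨hi0, hilt⟩ := hi
      obtain ⟨j, rfl⟩ : ∃ j : Nat, i = (j : Int) := ⟨i.toNat, (Int.toNat_of_nonneg hi0).symm⟩
      rw [beq_iff_eq, String.ext_iff] at hc
      rw [PySem.Str.toList_slice, PySem.Chars.slice_eq_listSlice, hsp] at hc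
      have h2 : ((j : Int) + 2) = ((j : Int) + ((2 : Nat) : Int)) := by norm_num
      rw [h2, PySem.List.slice_natCast_add] at hc
      have hKl : K.toList = N.toList.take j := by
        rw [hK, PySem.Str.toList_slice, PySem.Chars.slice_eq_listSlice,
          PySem.List.slice_to_natCast]
      have hpre : [' ', '('] <+: N.toList.drop j := by
        rw [← hc]; exact List.take_prefix 2 _
      rw [hKl]
      have := (List.prefix_append_right_inj (N.toList.take j)).mpr hpre
      rwa [List.take_append_drop] at this
  rw [hmain]
  constructor
  · rintro (rfl | h)
    · exact Or.inl rfl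
    · exact Or.inr (by simpa using h)
  · rintro (rfl | h)
    · exact Or.inl rfl
    · exact Or.inr (by simpa using h)

-- ===== VERDICT (by name: the statement is the Claim_ definition above) =====
theorem lookup_capabilities_py_spec : Claim_equal_lookup_capabilities_py := by
  intro name mapping _
  unfold Spec_lookup_capabilities_py lookup_capabilities_py lookup_capabilities_py_alt
  simp only
  rw [pv_foldl_update, List.filter_congr (fun kv _ => by
    rw [pv_pred_eq (pvNormalize name) (pvNormalize kv.1)])]
  rw [PySem.Set.ofList_eq_foldl]
  rfl
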